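-- pv_equiv track=rewrite | github.com/cspc777/VR | data_loader.py | get_clips_by_stride
-- ===== SOURCE A (Python) =====
-- def get_clips_by_stride(stride, frames_list, sequence_size):
--     """ For data augmenting purposes.
--     Parameters
--     ----------
--     stride : int
--         The desired distance between two consecutive frames
--     frames_list : list
--         A list of image path
--     sequence_size: int
--         The size of sequence
--     Returns
--     -------
--     list
--         A list of clips , 10 frames each ex. [0, 1, 2, 3, 4, 5]
--                                              [6, 7, 8, 9, 10, 11]
--     """
--     clips = []
--     sz = len(frames_list)
--     clip = []
--     cnt = 0
--     for start in range(0, stride):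
--         for i in range(start, sz, stride):
--             clip.append(frames_list[i])
--             cnt = cnt + 1
--             if cnt == sequence_size:
--                 clips.append(clip)
--                 clip = []
--                 cnt = 0
--     return clips
-- ===== SOURCE B (Python) =====
-- def get_clips_by_stride(stride, frames_list, sequence_size):
--     sz = len(frames_list)
--     # build the stride-major flattened frame order, then partition it
--     flat = [frames_list[i] for start in range(stride) for i in range(start, sz, stride)]
--     clips = []
--     while sequence_size > 0 and len(flat) >= sequence_size:
--         clips.append(flat[:sequence_size])
--         flat = flat[sequence_size:]
--     return clips
-- ===== Notes on version B (the rewrite author's own statement) =====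
-- stated objective: simpler
-- what changed: Replaces the interleaved single loop with a running element counter by a build-then-partition decomposition: first materialise the stride-major flattened frame order, then cut it into consecutive complete blocks of sequence_size.
import Mathlib
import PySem

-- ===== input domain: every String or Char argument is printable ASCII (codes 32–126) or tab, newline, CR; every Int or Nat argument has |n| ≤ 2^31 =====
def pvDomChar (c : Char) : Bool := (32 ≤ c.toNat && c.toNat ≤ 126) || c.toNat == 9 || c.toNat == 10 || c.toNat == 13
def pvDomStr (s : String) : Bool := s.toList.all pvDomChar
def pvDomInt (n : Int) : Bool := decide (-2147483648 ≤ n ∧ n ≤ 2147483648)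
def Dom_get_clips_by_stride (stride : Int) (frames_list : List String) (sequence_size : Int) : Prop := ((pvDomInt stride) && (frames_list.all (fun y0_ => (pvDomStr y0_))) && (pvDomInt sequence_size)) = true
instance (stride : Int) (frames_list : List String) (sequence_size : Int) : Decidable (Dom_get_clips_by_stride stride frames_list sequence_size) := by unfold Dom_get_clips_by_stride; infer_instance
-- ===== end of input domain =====

-- B rebuilds the result as build-then-partition (flatten in stride-major order, then chunk);
-- objective: simpler. Both programs are total; equivalence is proved on the whole domain.

-- ===== PORT A =====
-- literal transliteration of A's nested loop with the running counter; the index i of the inner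
-- range(start, sz, stride) always lies in [0, sz), so pyGetD with default "" is exact there.
def get_clips_by_stride (stride : Int) (frames_list : List String) (sequence_size : Int) : List (List String) :=
  let sz : Int := frames_list.length
  let final :=
    (PySem.List.pyRange 0 stride 1).foldl (fun s start =>
      (PySem.List.pyRange start sz stride).foldl (fun s i =>
        let clip := s.2.1 ++ [PySem.List.pyGetD frames_list i ""]
        let cnt := s.2.2 + 1
        if cnt = sequence_size then (s.1 ++ [clip], ([] : List String), (0 : Int))
        else (s.1, clip, cnt)) s)
      (([] : List (List String)), ([] : List String), (0 : Int))
  final.1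

-- ===== PORT B =====
-- B's while loop: peel complete blocks of sequence_size off the front of flat
def pvAltLoop (sequence_size : Int) (flat : List String) (clips : List (List String)) : List (List String) :=
  if h : 0 < sequence_size ∧ sequence_size ≤ (flat.length : Int) then
    pvAltLoop sequence_size (PySem.List.slice flat (some sequence_size) none)
      (clips ++ [PySem.List.slice flat none (some sequence_size)])
  else clips
termination_by flat.length
decreasing_by
  rw [PySem.List.slice_from _ (le_of_lt h.1)]
  simp only [List.length_drop]
  omega

def get_clips_by_stride_alt (stride : Int) (frames_list : List String) (sequence_size : Int) : List (List String) :=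
  let sz : Int := frames_list.length
  let flat :=
    (PySem.List.pyRange 0 stride 1).foldl (fun acc start =>
      acc ++ (PySem.List.pyRange start sz stride).map (fun i => PySem.List.pyGetD frames_list i ""))
      ([] : List String)
  pvAltLoop sequence_size flat []

-- ===== PRECONDITION & SPEC =====
def Spec_get_clips_by_stride (stride : Int) (frames_list : List String) (sequence_size : Int) (out : List (List String)) : Prop := out = get_clips_by_stride_alt stride frames_list sequence_size
instance (stride : Int) (frames_list : List String) (sequence_size : Int) (out : List (List String)) : Decidable (Spec_get_clips_by_stride stride frames_list sequence_size out) := by unfold Spec_get_clips_by_stride; infer_instance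

-- ===== CLAIM (what is proved, stated in full; the proofs are below) =====
def Claim_equal_get_clips_by_stride : Prop := ∀ (stride : Int) (frames_list : List String) (sequence_size : Int), Dom_get_clips_by_stride stride frames_list sequence_size → Spec_get_clips_by_stride stride frames_list sequence_size (get_clips_by_stride stride frames_list sequence_size)

-- ===== LEMMAS AND PROOFS =====

-- A's loop body as a step function on the state (clips, clip, cnt)
def pvStepA (seq : Int) (s : List (List String) × List String × Int) (x : String) :
    List (List String) × List String × Int :=
  let clip := s.2.1 ++ [x]
  let cnt := s.2.2 + 1
  if cnt = seq then (s.1 ++ [clip], ([] : List String), (0 : Int))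
  else (s.1, clip, cnt)

-- interleaving the step through the nested ranges = stepping through the flattened list
lemma pv_nested_fold {S : Type} (outer : List Int) (inner : Int → List Int)
    (g : Int → String) (f : S → String → S) :
    ∀ (acc : List String) (s : S),
      outer.foldl (fun s st => (inner st).foldl (fun s i => f s (g i)) s) (acc.foldl f s)
        = (outer.foldl (fun a st => a ++ (inner st).map g) acc).foldl f s := by
  induction outer with
  | nil => intro acc s; rfl
  | cons o os ih =>
    intro acc s
    simp only [List.foldl_cons]
    have h1 : (inner o).foldl (fun s i => f s (g i)) (acc.foldl f s)
        = (acc ++ (inner o).map g).foldl f s := by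
      rw [List.foldl_append, List.foldl_map]
    rw [h1]
    exact ih (acc ++ (inner o).map g) s

lemma pvAltLoop_acc (n : Int) : ∀ (flat : List String) (clips : List (List String)),
    pvAltLoop n flat clips = clips ++ pvAltLoop n flat [] := by
  have key : ∀ (m : Nat) (flat : List String), flat.length ≤ m →
      ∀ (clips : List (List String)), pvAltLoop n flat clips = clips ++ pvAltLoop n flat [] := by
    intro m
    induction m with
    | zero =>
      intro flat hlen clips
      have hx : ¬ (0 < n ∧ n ≤ (flat.length : Int)) := by omega
      rw [pvAltLoop, dif_neg hx, pvAltLoop, dif_neg hx]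
      simp
    | succ m ih =>
      intro flat hlen clips
      by_cases h : 0 < n ∧ n ≤ (flat.length : Int)
      · have hlen' : (PySem.List.slice flat (some n)).length ≤ m := by
          rw [PySem.List.slice_from _ (le_of_lt h.1)]
          simp only [List.length_drop]
          omega
        have h1 : pvAltLoop n flat clips = pvAltLoop n (PySem.List.slice flat (some n))
            (clips ++ [PySem.List.slice flat none (some n)]) := by
          rw [pvAltLoop, dif_pos h]
        have h2 : pvAltLoop n flat [] = pvAltLoop n (PySem.List.slice flat (some n))
            ([] ++ [PySem.List.slice flat none (some n)]) := by
          rw [pvAltLoop, dif_pos h]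
        rw [h1, h2, ih _ hlen' (clips ++ [PySem.List.slice flat none (some n)]),
          ih _ hlen' ([] ++ [PySem.List.slice flat none (some n)])]
        simp
      · rw [pvAltLoop, dif_neg h, pvAltLoop, dif_neg h]
        simp
  intro flat clips
  exact key flat.length flat le_rfl clips

lemma pv_fold_pos (n : Int) (hn : 0 < n) :
    ∀ (xs : List String) (clips : List (List String)) (clip : List String),
      (clip.length : Int) < n →
      (xs.foldl (pvStepA n) (clips, clip, (clip.length : Int))).1
        = clips ++ pvAltLoop n (clip ++ xs) [] := by
  intro xs
  induction xs with
  | nil =>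
    intro clips clip hlt
    rw [pvAltLoop, dif_neg (by simp; omega)]
    simp
  | cons x xs ih =>
    intro clips clip hlt
    simp only [List.foldl_cons]
    by_cases hc : (clip.length : Int) + 1 = n
    · have hstep : pvStepA n (clips, clip, (clip.length : Int)) x
          = (clips ++ [clip ++ [x]], ([] : List String), (0 : Int)) := by
        simp [pvStepA, hc]
      rw [hstep]
      have h0 : ((List.length ([] : List String) : Int)) = (0 : Int) := by simp
      have := ih (clips ++ [clip ++ [x]]) [] (by simpa using hn)
      simp only [List.length_nil, Int.natCast_zero, List.nil_append] at this
      rw [this]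
      have hcond : 0 < n ∧ n ≤ ((clip ++ x :: xs).length : Int) := by
        constructor
        · exact hn
        · simp; omega
      have hto : PySem.List.slice (clip ++ x :: xs) none (some n) = clip ++ [x] := by
        rw [PySem.List.slice_to _ (le_of_lt hn)]
        have : n.toNat = clip.length + 1 := by omega
        rw [this, show clip ++ x :: xs = (clip ++ [x]) ++ xs by simp,
          show clip.length + 1 = (clip ++ [x]).length by simp]
        exact List.take_left
      have hfrom : PySem.List.slice (clip ++ x :: xs) (some n) none = xs := by
        rw [PySem.List.slice_from _ (le_of_lt hn)]
        have : n.toNat = clip.length + 1 := by omega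
        rw [this, show clip ++ x :: xs = (clip ++ [x]) ++ xs by simp,
          show clip.length + 1 = (clip ++ [x]).length by simp]
        exact List.drop_left
      have hR : pvAltLoop n (clip ++ x :: xs) [] = (clip ++ [x]) :: pvAltLoop n xs [] := by
        rw [pvAltLoop, dif_pos hcond, hto, hfrom, pvAltLoop_acc n xs ([] ++ [clip ++ [x]])]
        simp
      rw [hR]
      simp
    · have hstep : pvStepA n (clips, clip, (clip.length : Int)) x
          = (clips, clip ++ [x], ((clip ++ [x]).length : Int)) := by
        simp [pvStepA, hc]
      rw [hstep]
      have hlt' : (((clip ++ [x]).length : Int)) < n := by simp; omega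
      rw [ih clips (clip ++ [x]) hlt']
      simp
lemma pv_fold_nonpos (n : Int) (hn : n ≤ 0) :
    ∀ (xs : List String) (clips : List (List String)) (clip : List String) (cnt : Int),
      0 ≤ cnt → (xs.foldl (pvStepA n) (clips, clip, cnt)).1 = clips := by
  intro xs
  induction xs with
  | nil => intro clips clip cnt _; rfl
  | cons x xs ih =>
    intro clips clip cnt hc
    simp only [List.foldl_cons]
    have hstep : pvStepA n (clips, clip, cnt) x = (clips, clip ++ [x], cnt + 1) := by
      simp [pvStepA]
      omega
    rw [hstep]
    exact ih clips (clip ++ [x]) (cnt + 1) (by omega)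

-- ===== VERDICT (by name: the statement is the Claim_ definition above) =====
theorem get_clips_by_stride_spec : Claim_equal_get_clips_by_stride := by
  intro stride frames_list sequence_size _
  unfold Spec_get_clips_by_stride get_clips_by_stride get_clips_by_stride_alt
  simp only []
  have hA :
      ((PySem.List.pyRange 0 stride 1).foldl (fun s start =>
          (PySem.List.pyRange start (frames_list.length : Int) stride).foldl
            (fun s i => pvStepA sequence_size s (PySem.List.pyGetD frames_list i "")) s)
          (([] : List (List String)), ([] : List String), (0 : Int)))
        = ((PySem.List.pyRange 0 stride 1).foldl (fun a start =>
            a ++ (PySem.List.pyRange start (frames_list.length : Int) stride).map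
              (fun i => PySem.List.pyGetD frames_list i "")) ([] : List String)).foldl
            (pvStepA sequence_size) (([] : List (List String)), ([] : List String), (0 : Int)) := by
    exact pv_nested_fold (PySem.List.pyRange 0 stride 1)
      (fun start => PySem.List.pyRange start (frames_list.length : Int) stride)
      (fun i => PySem.List.pyGetD frames_list i "") (pvStepA sequence_size) [] _
  show ((PySem.List.pyRange 0 stride 1).foldl (fun s start =>
          (PySem.List.pyRange start (frames_list.length : Int) stride).foldl
            (fun s i => pvStepA sequence_size s (PySem.List.pyGetD frames_list i "")) s)
          (([] : List (List String)), ([] : List String), (0 : Int))).1 = _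
  rw [hA]
  set flat := (PySem.List.pyRange 0 stride 1).foldl (fun a start =>
      a ++ (PySem.List.pyRange start (frames_list.length : Int) stride).map
        (fun i => PySem.List.pyGetD frames_list i "")) ([] : List String) with hflat
  by_cases hpos : 0 < sequence_size
  · have := pv_fold_pos sequence_size hpos flat [] [] (by simpa using hpos)
    simpa using this
  · rw [pv_fold_nonpos sequence_size (by omega) flat [] [] 0 le_rfl]
    rw [pvAltLoop, dif_neg (by omega)]
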